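-- pv_equiv track=rewrite | github.com/Poomon001/Competitive-Programming | club python/Max Number of K-Sum Pairs/main.py | maxOperations_M3
-- ===== SOURCE A (Python) =====
-- from typing import List
--
-- def maxOperations_M3(nums: List[int], k: int) -> int:
--     # if diff + num = k then
--     # {diff, number of diff}
--     pair = {}
--     counter = 0
--
--     for num in nums:
--         diff = k - num
--
--         # increment count if there is a diff in a map
--         if num in pair and pair[num] > 0:
--             counter += 1
--             pair[num] -= 1
--             continue
--
--         # add a diff to a map
--         if diff in pair:
--             pair[diff] += 1
--         else:
--             pair[diff] = 1
--
--     return counter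
-- ===== SOURCE B (Python) =====
-- from typing import List
--
-- def maxOperations_M3(nums: List[int], k: int) -> int:
--     # Count every value once, then read the answer off the counts:
--     # each value v < k-v contributes min(cnt[v], cnt[k-v]) pairs,
--     # and if k is even the value k//2 pairs up with itself cnt[k//2]//2 times.
--     cnt = {}
--     for num in nums:
--         cnt[num] = cnt.get(num, 0) + 1
--     total = 0
--     for v in cnt:
--         c = k - v
--         if v < c:
--             total += min(cnt[v], cnt.get(c, 0))
--         elif v == c:
--             total += cnt[v] // 2
--     return total
-- ===== Notes on version B (the rewrite author's own statement) =====
-- stated objective: alternative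
-- what changed: A simulates the greedy pass with a pending-complement dict updated per element; B counts all occurrences once and reads the answer off the counts as min(cnt[v], cnt[k-v]) over values v < k-v plus cnt[k//2]//2 when k is even.
import Mathlib
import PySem

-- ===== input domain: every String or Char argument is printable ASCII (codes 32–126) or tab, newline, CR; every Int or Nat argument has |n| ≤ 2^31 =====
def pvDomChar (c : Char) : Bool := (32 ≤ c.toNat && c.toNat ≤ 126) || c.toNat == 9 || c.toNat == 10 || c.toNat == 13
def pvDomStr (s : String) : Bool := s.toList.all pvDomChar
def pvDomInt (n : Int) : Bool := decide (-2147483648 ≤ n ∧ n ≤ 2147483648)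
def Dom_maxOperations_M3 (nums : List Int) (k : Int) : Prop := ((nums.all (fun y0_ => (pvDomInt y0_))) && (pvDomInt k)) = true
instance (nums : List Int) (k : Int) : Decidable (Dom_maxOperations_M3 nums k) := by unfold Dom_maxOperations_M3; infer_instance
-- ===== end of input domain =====

-- B replaces A's greedy pending-complement dict with a count-then-formula pass (min of complement counts); same cost class, different algorithm.

-- ===== PORT A =====
-- one loop step of A: the pending-complement dict `pair` and `counter`
def stepA_M3 (k : Int) (st : PySem.Dict Int Int × Int) (num : Int) : PySem.Dict Int Int × Int :=
  let pair := st.1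
  let counter := st.2
  let diff := k - num
  if pair.contains num && decide (pair.getD num 0 > 0) then
    (pair.insert num (pair.getD num 0 - 1), counter + 1)
  else
    if pair.contains diff then
      (pair.insert diff (pair.getD diff 0 + 1), counter)
    else
      (pair.insert diff 1, counter)

def maxOperations_M3 (nums : List Int) (k : Int) : Int :=
  (nums.foldl (stepA_M3 k) (PySem.Dict.empty, 0)).2

-- ===== PORT B =====
def maxOperations_M3_alt (nums : List Int) (k : Int) : Int :=
  let cnt := nums.foldl (fun d num => d.insert num (d.getD num 0 + 1)) PySem.Dict.empty
  cnt.keys.foldl (fun total v =>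
    let c := k - v
    if v < c then total + min (cnt.getD v 0) (cnt.getD c 0)
    else if v = c then total + PySem.Int.floordiv (cnt.getD v 0) 2
    else total) 0

-- ===== PRECONDITION & SPEC =====
def Spec_maxOperations_M3 (nums : List Int) (k : Int) (out : Int) : Prop := out = maxOperations_M3_alt nums k
instance (nums : List Int) (k : Int) (out : Int) : Decidable (Spec_maxOperations_M3 nums k out) := by unfold Spec_maxOperations_M3; infer_instance

-- ===== CLAIM (what is proved, stated in full; the proofs are below) =====
def Claim_equal_maxOperations_M3 : Prop := ∀ (nums : List Int) (k : Int), Dom_maxOperations_M3 nums k → Spec_maxOperations_M3 nums k (maxOperations_M3 nums k)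

-- ===== LEMMAS AND PROOFS =====

-- number of occurrences of v, as an Int
def cntI_M3 (p : List Int) (v : Int) : Int := (p.count v : Int)

-- B's per-value contribution, computed from the counts of p
def contrib_M3 (k : Int) (p : List Int) (v : Int) : Int :=
  if v < k - v then min (cntI_M3 p v) (cntI_M3 p (k - v)) else if v = k - v then (cntI_M3 p v) / 2 else 0

-- the pending (unmatched) multiplicity of value v after A has processed p
def pend_M3 (k : Int) (p : List Int) (v : Int) : Int :=
  if v = k - v then (cntI_M3 p v) % 2 else max (cntI_M3 p v - cntI_M3 p (k - v)) 0

-- the closed-form total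
def S_M3 (k : Int) (p : List Int) : Int := ∑ v ∈ p.toFinset, contrib_M3 k p v

-- A's loop step on the abstract state: s v = pending multiplicity of value v
def astep_M3 (k : Int) (st : (Int → Int) × Int) (num : Int) : (Int → Int) × Int :=
  if st.1 (k - num) > 0 then (Function.update st.1 (k - num) (st.1 (k - num) - 1), st.2 + 1)
  else (Function.update st.1 num (st.1 num + 1), st.2)

lemma cntI_append (p : List Int) (a v : Int) :
    cntI_M3 (p ++ [a]) v = cntI_M3 p v + (if a = v then 1 else 0) := by
  simp only [cntI_M3, List.count_append, List.count_singleton]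
  push_cast
  rcases eq_or_ne a v with h | h
  · simp [h]
  · simp [h]

lemma cntI_not_mem (p : List Int) (v : Int) (h : v ∉ p) : cntI_M3 p v = 0 := by
  simp [cntI_M3, List.count_eq_zero_of_not_mem h]

-- appending one element changes the closed-form total by 1 exactly when a pending complement exists
lemma S_append (k : Int) (p : List Int) (a : Int) :
    S_M3 k (p ++ [a]) = S_M3 k p + (if pend_M3 k p (k - a) > 0 then 1 else 0) := by
  have hka : k - (k - a) = a := by ring
  have hU : (p ++ [a]).toFinset = insert a p.toFinset := by simp [List.toFinset_append]
  have hSp : S_M3 k p = ∑ v ∈ insert a p.toFinset, contrib_M3 k p v := by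
    rw [S_M3]
    refine (Finset.sum_insert_of_eq_zero_if_notMem ?_).symm
    intro hna
    have h0 : cntI_M3 p a = 0 := cntI_not_mem p a (by simpa using hna)
    simp only [cntI_M3] at h0
    simp only [contrib_M3, cntI_M3]
    split_ifs <;> omega
  have hmain : ∑ v ∈ insert a p.toFinset, (contrib_M3 k (p ++ [a]) v - contrib_M3 k p v)
      = (if pend_M3 k p (k - a) > 0 then 1 else 0) := by
    have hsupp : ∀ v, v ≠ a → v ≠ k - a →
        contrib_M3 k (p ++ [a]) v - contrib_M3 k p v = 0 := by
      intro v hva hvka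
      have hak : ¬ (a = k - v) := by omega
      simp only [contrib_M3, cntI_append, if_neg (Ne.symm hva), if_neg hak, add_zero]
      omega
    rcases eq_or_ne a (k - a) with h2a | h2a
    · -- a pairs with itself: only the a-term moves
      rw [Finset.sum_eq_single_of_mem a (Finset.mem_insert_self a _)
        (fun b _ hb => hsupp b hb (by omega))]
      simp only [contrib_M3, pend_M3, hka]
      simp only [← h2a]
      simp only [cntI_append]
      simp only [cntI_M3]
      split_ifs <;> omega
    · by_cases hm : (k - a) ∈ insert a p.toFinset
      · rw [Finset.sum_eq_add_of_mem a (k - a) (Finset.mem_insert_self a _) hm (by omega)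
          (fun c _ hc => hsupp c hc.1 hc.2)]
        simp only [contrib_M3, pend_M3, hka]
        simp only [cntI_append]
        simp only [cntI_M3]
        split_ifs <;> omega
      · have h0 : cntI_M3 p (k - a) = 0 := by
          refine cntI_not_mem p (k - a) fun hmem =>
            hm (Finset.mem_insert_of_mem (List.mem_toFinset.mpr hmem))
        simp only [cntI_M3] at h0
        rw [Finset.sum_eq_single_of_mem a (Finset.mem_insert_self a _)
          (fun b hb hba => if hbk : b = k - a then absurd (hbk ▸ hb) hm else hsupp b hba hbk)]
        simp only [contrib_M3, pend_M3, hka]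
        simp only [cntI_append]
        simp only [cntI_M3]
        split_ifs <;> omega
  rw [S_M3, hU, hSp]
  have hd := Finset.sum_sub_distrib (s := insert a p.toFinset)
    (f := contrib_M3 k (p ++ [a])) (g := contrib_M3 k p)
  omega

-- one abstract step preserves the (pend, S) characterization
lemma astep_char (k : Int) (p : List Int) (a : Int) :
    astep_M3 k (pend_M3 k p, S_M3 k p) a = (pend_M3 k (p ++ [a]), S_M3 k (p ++ [a])) := by
  have hka : k - (k - a) = a := by ring
  by_cases hhit : pend_M3 k p (k - a) > 0
  · simp only [astep_M3]
    rw [if_pos hhit]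
    refine Prod.ext ?_ ?_
    · show Function.update (pend_M3 k p) (k - a) (pend_M3 k p (k - a) - 1) = pend_M3 k (p ++ [a])
      funext v
      rw [Function.update_apply]
      rcases eq_or_ne v (k - a) with hv | hv
      · rw [if_pos hv, hv]
        by_cases h2a : a = k - a
        · simp only [pend_M3, ← h2a] at hhit ⊢
          simp only [cntI_append]
          simp only [cntI_M3] at hhit ⊢
          split_ifs at hhit ⊢ <;> omega
        · simp only [pend_M3, hka] at hhit ⊢
          simp only [cntI_append]
          simp only [cntI_M3] at hhit ⊢
          split_ifs at hhit ⊢ <;> omega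
      · rw [if_neg hv]
        rcases eq_or_ne v a with hva | hva
        · rw [hva]
          simp only [pend_M3, hka] at hhit ⊢
          simp only [cntI_append]
          simp only [cntI_M3] at hhit ⊢
          split_ifs at hhit ⊢ <;> omega
        · simp only [pend_M3, hka] at hhit ⊢
          simp only [cntI_append]
          simp only [cntI_M3] at hhit ⊢
          split_ifs at hhit ⊢ <;> omega
    · show S_M3 k p + 1 = S_M3 k (p ++ [a])
      rw [S_append, if_pos hhit]
  · simp only [astep_M3]
    rw [if_neg hhit]
    refine Prod.ext ?_ ?_
    · show Function.update (pend_M3 k p) a (pend_M3 k p a + 1) = pend_M3 k (p ++ [a])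
      funext v
      rw [Function.update_apply]
      rcases eq_or_ne v a with hv | hv
      · rw [if_pos hv, hv]
        by_cases h2a : a = k - a
        · simp only [pend_M3, ← h2a] at hhit ⊢
          simp only [cntI_append]
          simp only [cntI_M3] at hhit ⊢
          split_ifs at hhit ⊢ <;> omega
        · simp only [pend_M3, hka] at hhit ⊢
          simp only [cntI_append]
          simp only [cntI_M3] at hhit ⊢
          split_ifs at hhit ⊢ <;> omega
      · rw [if_neg hv]
        rcases eq_or_ne v (k - a) with hvk | hvk
        · rw [hvk]
          simp only [pend_M3, hka] at hhit ⊢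
          simp only [cntI_append]
          simp only [cntI_M3] at hhit ⊢
          split_ifs at hhit ⊢ <;> omega
        · simp only [pend_M3, hka] at hhit ⊢
          simp only [cntI_append]
          simp only [cntI_M3] at hhit ⊢
          split_ifs at hhit ⊢ <;> omega
    · show S_M3 k p = S_M3 k (p ++ [a])
      rw [S_append, if_neg hhit, add_zero]

-- the abstract fold computes (pend, S)
lemma afold_char (k : Int) (p : List Int) :
    p.foldl (astep_M3 k) ((fun _ => 0), 0) = (pend_M3 k p, S_M3 k p) := by
  induction p using List.reverseRecOn with
  | nil =>
    refine Prod.ext ?_ ?_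
    · funext v; simp [pend_M3, cntI_M3]
    · simp [S_M3]
  | append_singleton p a ih =>
    rw [List.foldl_append, ih]
    simpa using astep_char k p a

-- A's dict step tracks the abstract step (relation: d.getD v 0 = s (k - v))
lemma stepA_rel (k : Int) (d : PySem.Dict Int Int) (s : Int → Int) (c : Int) (a : Int)
    (h : ∀ v, d.getD v 0 = s (k - v)) :
    (∀ v, (stepA_M3 k (d, c) a).1.getD v 0 = (astep_M3 k (s, c) a).1 (k - v)) ∧
      (stepA_M3 k (d, c) a).2 = (astep_M3 k (s, c) a).2 := by
  have ha := h a
  have hb : (d.contains a && decide (d.getD a 0 > 0)) = decide (s (k - a) > 0) := by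
    cases hc : d.contains a
    · rw [PySem.Dict.getD_of_not_contains _ _ hc] at ha
      simp [← ha]
    · simp [ha]
  by_cases hs : s (k - a) > 0
  · have hc : (d.contains a && decide (d.getD a 0 > 0)) = true := by
      rw [hb]; simpa using hs
    constructor
    · intro v
      simp only [stepA_M3, astep_M3, hc, hs, if_pos]
      rw [PySem.Dict.getD_insert, Function.update_apply]
      rcases eq_or_ne v a with hv | hv
      · simp [hv, ha]
      · have : ¬ (k - v = k - a) := by omega
        simp [hv, this, h v]
    · simp [stepA_M3, astep_M3, hc, hs]
  · have hc : (d.contains a && decide (d.getD a 0 > 0)) = false := by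
      rw [hb]; simpa using hs
    have hdiff : d.getD (k - a) 0 = s a := by
      have := h (k - a)
      simpa [show k - (k - a) = a by omega] using this
    have key : ∀ w, w = s a + 1 →
        (∀ v, (d.insert (k - a) w).getD v 0 = Function.update s a (s a + 1) (k - v)) := by
      intro w hw v
      rw [PySem.Dict.getD_insert, Function.update_apply]
      rcases eq_or_ne v (k - a) with hv | hv
      · have : k - v = a := by omega
        simp [hv, hw]
      · have : ¬ (k - v = a) := by omega
        simp [hv, this, h v]
    constructor
    · intro v
      by_cases hcd : d.contains (k - a) = true
      · simp only [stepA_M3, astep_M3, hc, hs, hcd]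
        simpa using key _ (by rw [hdiff]) v
      · simp only [stepA_M3, astep_M3, hc, hs, hcd]
        have h0 : d.getD (k - a) 0 = 0 :=
          PySem.Dict.getD_of_not_contains _ _ (by simpa using hcd)
        simpa using key 1 (by rw [← hdiff, h0]; ring) v
    · by_cases hcd : d.contains (k - a) = true <;>
        simp [stepA_M3, astep_M3, hc, hs, hcd]

lemma foldA_rel (k : Int) (l : List Int) (d : PySem.Dict Int Int) (s : Int → Int) (c : Int)
    (h : ∀ v, d.getD v 0 = s (k - v)) :
    (∀ v, (l.foldl (stepA_M3 k) (d, c)).1.getD v 0 = (l.foldl (astep_M3 k) (s, c)).1 (k - v)) ∧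
      (l.foldl (stepA_M3 k) (d, c)).2 = (l.foldl (astep_M3 k) (s, c)).2 := by
  induction l generalizing d s c with
  | nil => exact ⟨h, rfl⟩
  | cons a l ih =>
    have st := stepA_rel k d s c a h
    simp only [List.foldl_cons]
    have : astep_M3 k (s, c) a = ((astep_M3 k (s, c) a).1, (astep_M3 k (s, c) a).2) := rfl
    rw [this, ← st.2]
    exact ih _ _ _ st.1

-- A computes the closed-form total
lemma portA_eq_S (nums : List Int) (k : Int) : maxOperations_M3 nums k = S_M3 k nums := by
  have h0 : ∀ v : Int, (PySem.Dict.empty : PySem.Dict Int Int).getD v 0 = (fun _ : Int => (0 : Int)) (k - v) := by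
    intro v; simp [PySem.Dict.getD_empty]
  have := (foldA_rel k nums PySem.Dict.empty (fun _ => 0) 0 h0).2
  rw [maxOperations_M3, this, afold_char]

-- B computes the closed-form total
lemma portB_eq_S (nums : List Int) (k : Int) : maxOperations_M3_alt nums k = S_M3 k nums := by
  unfold maxOperations_M3_alt
  simp only [PySem.Dict.foldl_insert_getD_add_one_eq_counter, PySem.Dict.keys_counter]
  have hf : (fun (total v : Int) =>
      let c := k - v
      if v < c then total + min ((PySem.Dict.counter nums).getD v 0) ((PySem.Dict.counter nums).getD c 0)
      else if v = c then total + PySem.Int.floordiv ((PySem.Dict.counter nums).getD v 0) 2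
      else total) = (fun (total v : Int) => total + contrib_M3 k nums v) := by
    funext t v
    simp only [PySem.Dict.getD_counter, contrib_M3, cntI_M3,
      PySem.Int.floordiv_eq_ediv_of_pos (by norm_num : (0:Int) < 2)]
    split_ifs <;> omega
  rw [hf, PySem.List.foldl_add, zero_add, S_M3]
  have hFin : (PySem.Set.ofList nums).toFinset = nums.toFinset := by
    ext v; simp [PySem.Set.mem_ofList]
  rw [← hFin, List.sum_toFinset _ (PySem.Set.nodup_ofList nums)]

-- ===== VERDICT (by name: the statement is the Claim_ definition above) =====
theorem maxOperations_M3_spec : Claim_equal_maxOperations_M3 := by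
  intro nums k _
  unfold Spec_maxOperations_M3
  rw [portA_eq_S, portB_eq_S]
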